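-- pv_equiv track=rewrite | github.com/sangpyeong/codingtest | 프로그래머스/파이썬/무지의 먹방 라이브.py | solution
-- ===== SOURCE A (Python) =====
-- def solution(food_times, k):
--     answer = 0
--     if sum(food_times)<=k:
--         return -1
--     sorted_food = sorted(food_times)
--     N = len(food_times)
--     mn_food = 0
--     prev_food = 0
--     eat_food = 0
--     for i in range(N):
--         if mn_food < sorted_food[i]:
--             mn_food = sorted_food[i]
--             if k > (N-i)*(mn_food-prev_food):
--                 k -= (N-i)*(mn_food-prev_food)
--                 prev_food = mn_food
--             else:
--                 if k <= N-i:
--                     for j in range(N):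
--
--                         if food_times[j] <= prev_food:
--                             continue
--                         k -= 1
--                         if k == 0:
--                             eat_food = j
--                             break
--                 else:
--                     k -= (k//(N-i))*(N-i)
--                     for j in range(N):
--                         if food_times[j] <= prev_food:
--                             continue
--                         k -= 1
--                         if k == 0:
--                             eat_food = j
--                             break
--                 break
--     eat_food = (eat_food + 1) % N
--     while food_times[eat_food] <= prev_food:
--         eat_food = (eat_food + 1) % N
--
--     answer = eat_food + 1
--     return answer
-- ===== SOURCE B (Python) =====
-- def solution(food_times, k):
--     if sum(food_times) <= k:
--         return -1
--     prev = 0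
--     for v in sorted(set(t for t in food_times if t > 0)):
--         cnt = sum(1 for t in food_times if t > prev)
--         if k <= cnt * (v - prev):
--             break
--         k -= cnt * (v - prev)
--         prev = v
--     survivors = [i for i, t in enumerate(food_times) if t > prev]
--     return survivors[k % len(survivors)] + 1
-- ===== Notes on version B (the rewrite author's own statement) =====
-- stated objective: simpler
-- what changed: A scans the sorted times array with index bookkeeping, an inner countdown rescan of the original list and a final cyclic while-loop; B loops over the sorted distinct positive values subtracting whole rounds, then builds the survivor-index list once and returns survivors[k % len(survivors)] + 1 directly. Pre_ excludes negative outage times k (with sum(food_times) > k), which are outside the task's domain; A's value there is an artefact of its countdown loop never reaching zero.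
-- intended difference: When the leftover time after the last whole round is zero modulo the number of surviving foods (and is not exactly one round, with food 1 itself surviving and at least two survivors), A's stale eat_food=0 makes it return the second surviving food, while B returns the first surviving food, which is the food actually eaten when resuming after whole rounds. — e.g. on solution([1, 1], 0): A returns 2, B returns 1
-- outside the precondition, e.g. on solution([1, 1, 1], -1): A returns 2, B returns 3
import Mathlib
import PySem

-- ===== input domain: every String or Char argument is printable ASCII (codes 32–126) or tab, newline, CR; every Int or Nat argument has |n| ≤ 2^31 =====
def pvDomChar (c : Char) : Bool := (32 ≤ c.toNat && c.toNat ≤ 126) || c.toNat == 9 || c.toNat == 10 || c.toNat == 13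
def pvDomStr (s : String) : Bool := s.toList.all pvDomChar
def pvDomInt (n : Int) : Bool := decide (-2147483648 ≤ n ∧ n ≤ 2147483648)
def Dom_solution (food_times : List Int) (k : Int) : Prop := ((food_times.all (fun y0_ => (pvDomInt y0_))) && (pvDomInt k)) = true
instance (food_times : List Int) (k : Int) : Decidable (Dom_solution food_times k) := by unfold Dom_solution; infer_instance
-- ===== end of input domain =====

-- B replaces A's sorted-array scan + countdown rescans + cyclic while-loop by a loop over the
-- sorted distinct positive values and a direct modular index into the survivor list
-- (objective: simpler); on a stated exceptional region D_ A's stale eat_food makes it return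
-- the second surviving food where B returns the first.

-- ===== PORT A =====
-- inner 'for j in range(N): if food_times[j] <= prev: continue; k -= 1; if k == 0: eat = j; break'
def scanA (xs : List Int) (prev : Int) (st0 : Int × Int × Bool) : Int × Int × Bool :=
  (PySem.List.pyRange 0 (PySem.List.len xs) 1).foldl
    (fun st j =>
      match st with
      | (kk, eat, br) =>
        if br then (kk, eat, br)
        else if PySem.List.pyGetD xs j 0 ≤ prev then (kk, eat, br)
        else if kk - 1 = 0 then (kk - 1, j, true)
        else (kk - 1, eat, br)) st0

-- one iteration of A's outer 'for i in range(N)' (state: mn_food, prev_food, k, eat_food, broken)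
def bodyA (xs : List Int) (N : Int) (st : Int × Int × Int × Int × Bool) (i : Int) :
    Int × Int × Int × Int × Bool :=
  match st with
  | (mn, prev, kk, eat, br) =>
    if br then (mn, prev, kk, eat, br)
    else
      let v := PySem.List.pyGetD (PySem.List.sorted xs (fun x => x) false) i 0
      if mn < v then
        if kk > (N - i) * (v - prev) then (v, v, kk - (N - i) * (v - prev), eat, false)
        else
          let sres :=
            if kk ≤ N - i then scanA xs prev (kk, eat, false)
            else scanA xs prev (kk - (PySem.Int.floordiv kk (N - i)) * (N - i), eat, false)
          (v, prev, sres.1, sres.2.1, true)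
      else (mn, prev, kk, eat, br)

-- 'while food_times[eat_food] <= prev_food: eat_food = (eat_food + 1) % N' (fuel N: enough
-- whenever a survivor exists, i.e. on every input Pre_ admits that reaches the loop)
def whileA (xs : List Int) (prev N : Int) : Nat → Int → Int
  | 0, e => e
  | fuel + 1, e =>
      if PySem.List.pyGetD xs e 0 ≤ prev then whileA xs prev N fuel (PySem.Int.mod (e + 1) N)
      else e

def solution (food_times : List Int) (k : Int) : Int :=
  if food_times.sum ≤ k then -1
  else
    let N : Int := PySem.List.len food_times
    let st := (PySem.List.pyRange 0 N 1).foldl (bodyA food_times N) (0, 0, k, 0, false)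
    match st with
    | (_, prev, _, eat, _) =>
      let e1 := PySem.Int.mod (eat + 1) N
      whileA food_times prev N N.toNat e1 + 1

-- ===== PORT B =====
-- one iteration of B's 'for v in sorted(set(t for t in food_times if t > 0))' loop
def bodyB (xs : List Int) (st : Int × Int × Bool) (v : Int) : Int × Int × Bool :=
  match st with
  | (prev, kk, br) =>
    if br then (prev, kk, br)
    else
      let c := (xs.map (fun t => if prev < t then (1 : Int) else 0)).sum
      if kk ≤ c * (v - prev) then (prev, kk, true)
      else (v, kk - c * (v - prev), false)

def solution_alt (food_times : List Int) (k : Int) : Int :=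
  if food_times.sum ≤ k then -1
  else
    let st := (PySem.List.sorted
      (PySem.Set.ofList (food_times.filter (fun t => decide (0 < t)))) (fun x => x) false).foldl
      (bodyB food_times) ((0 : Int), k, false)
    match st with
    | (prev, kk, _) =>
      let survivors := ((PySem.List.enumerate food_times 0).filter
        (fun p => decide (prev < p.2))).map (fun p => p.1)
      PySem.List.pyGetD survivors (PySem.Int.mod kk (PySem.List.len survivors)) 0 + 1

-- ===== PRECONDITION & SPEC =====
-- Pre_ excludes negative outage times k (with sum food_times > k): a negative k is outside the
-- task's natural domain, and A's value there is an artefact of its countdown loop (k can never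
-- reach 0, leaving the stale eat_food = 0); for some such inputs A even loops forever.
def Pre_solution (food_times : List Int) (k : Int) : Prop :=
  0 ≤ k ∨ food_times.sum ≤ k
instance (food_times : List Int) (k : Int) : Decidable (Pre_solution food_times k) := by
  unfold Pre_solution; infer_instance

def pvWitness_solution : List Int × Int := ([3, 1, 2], 2)

-- time consumed once every food with (positive) time ≤ p is finished and every other food has
-- eaten p seconds: sum over t of min(max(t,0), p)
def Cspent : List Int → Int → Int
  | [], _ => 0
  | t :: r, p => min (max t 0) p + Cspent r p

-- On inputs where, at the resume threshold p (the largest reached value with spent time < k),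
-- the leftover time k - Cspent p is a multiple of the survivor count other than the count itself
-- and food 1 itself survives (with at least two survivors), A returns the SECOND surviving food
-- (its eat_food is left at its stale initial 0) while B returns the FIRST surviving food, which
-- is the food actually being eaten when whole rounds divide the leftover time.
def D_solution (food_times : List Int) (k : Int) : Prop :=
  0 ≤ k ∧ k < food_times.sum ∧
  ∃ p ∈ 0 :: food_times,
    let c := Cspent food_times (p + 1) - Cspent food_times p
    let r := k - Cspent food_times p
    (p = 0 ∨ (0 < p ∧ 0 < r)) ∧
    (∀ v ∈ food_times, p < v → k ≤ Cspent food_times v) ∧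
    p < food_times.headD 0 ∧ 2 ≤ c ∧ c ∣ r ∧ r ≠ c
instance (food_times : List Int) (k : Int) : Decidable (D_solution food_times k) := by
  unfold D_solution; infer_instance

def Spec_solution (food_times : List Int) (k : Int) (out : Int) : Prop :=
  ¬ D_solution food_times k → out = solution_alt food_times k
instance (food_times : List Int) (k : Int) (out : Int) : Decidable (Spec_solution food_times k out) := by
  unfold Spec_solution; infer_instance

def pvDiffWitness_solution : List Int × Int := ([1, 1], 0)
def pvDiffWitnessOut_solution : Int × Int := (2, 1)

-- ===== CLAIM (what is proved, stated in full; the proofs are below) =====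
def Claim_unchanged_solution : Prop := ∀ (food_times : List Int) (k : Int),
  Dom_solution food_times k → Pre_solution food_times k →
  Spec_solution food_times k (solution food_times k)

def Claim_changed_solution : Prop :=
  Dom_solution (pvDiffWitness_solution.1) (pvDiffWitness_solution.2) ∧
  Pre_solution (pvDiffWitness_solution.1) (pvDiffWitness_solution.2) ∧
  D_solution (pvDiffWitness_solution.1) (pvDiffWitness_solution.2) ∧
  solution (pvDiffWitness_solution.1) (pvDiffWitness_solution.2) = pvDiffWitnessOut_solution.1 ∧
  solution_alt (pvDiffWitness_solution.1) (pvDiffWitness_solution.2) = pvDiffWitnessOut_solution.2 ∧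
  pvDiffWitnessOut_solution.1 ≠ pvDiffWitnessOut_solution.2

def Claim_exact_solution : Prop := ∀ (food_times : List Int) (k : Int),
  Dom_solution food_times k → Pre_solution food_times k → D_solution food_times k →
  solution food_times k ≠ solution_alt food_times k

-- ===== LEMMAS AND PROOFS =====
-- (everything below is proof infrastructure)

-- The survivor-index list: indices (as Python ints) of the foods still strictly above p.
def surv (xs : List Int) (p : Int) : List Int :=
  ((PySem.List.enumerate xs 0).filter (fun q => decide (p < q.2))).map (fun q => q.1)

-- The common phase-1 recursion: consume whole rounds over the distinct remaining minimum value
-- until the budget no longer covers a full sweep; returns (threshold prev, remaining budget).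
def phi (xs : List Int) (prev k : Int) : Int × Int :=
  match hm : PySem.List.min? (xs.filter (fun x => decide (prev < x))) (fun x => x) with
  | none => (prev, k)
  | some v =>
    let c : Int := xs.countP (fun x => decide (prev < x))
    if k ≤ c * (v - prev) then (prev, k)
    else phi xs v (k - c * (v - prev))
termination_by (xs.countP (fun x => decide (prev < x)))
decreasing_by
  have hv := PySem.List.min?_mem hm
  rw [List.mem_filter] at hv
  have hpv : prev < v := by simpa using hv.2
  rw [List.countP_eq_length_filter, List.countP_eq_length_filter]
  have h1 : xs.filter (fun x => decide (v < x))
      = (xs.filter (fun x => decide (prev < x))).filter (fun x => decide (v < x)) := by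
    rw [List.filter_filter]
    apply List.filter_congr
    intro x _
    by_cases h : v < x
    · simp [h]
      omega
    · simp [h]
  rw [h1, List.length_filter_lt_length_iff_exists]
  exact ⟨v, List.mem_filter.mpr hv, by simp⟩

-- the food A's inner scan reports (its eat_food after the break), given break state (p, kk)
def eatOf (xs : List Int) (p kk e0 : Int) : Int :=
  let c : Int := xs.countP (fun x => decide (p < x))
  let r := if kk > c then PySem.Int.mod kk c else kk
  if 1 ≤ r ∧ r ≤ c then PySem.List.pyGetD (surv xs p) (r - 1) 0 else e0

-- the enumerate-shaped body of A's inner scan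
def scanB (prev : Int) (st : Int × Int × Bool) (q : Int × Int) : Int × Int × Bool :=
  match st with
  | (kk, eat, br) =>
    if br then (kk, eat, br)
    else if q.2 ≤ prev then (kk, eat, br)
    else if kk - 1 = 0 then (kk - 1, q.1, true)
    else (kk - 1, eat, br)

lemma scanA_eq (xs : List Int) (prev : Int) (st0 : Int × Int × Bool) :
    scanA xs prev st0 = (PySem.List.enumerate xs 0).foldl (scanB prev) st0 := by
  rw [PySem.List.enumerate_eq_map_pyRange (d := 0), List.foldl_map]
  rfl

lemma scanB_frozen (prev : Int) (l : List (Int × Int)) (kk eat : Int) :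
    l.foldl (scanB prev) (kk, eat, true) = (kk, eat, true) := by
  induction l with
  | nil => rfl
  | cons q l ih => simpa [scanB] using ih

lemma bodyA_frozen (xs : List Int) (N : Int) (l : List Int) (mn prev kk eat : Int) :
    l.foldl (bodyA xs N) (mn, prev, kk, eat, true) = (mn, prev, kk, eat, true) := by
  induction l with
  | nil => rfl
  | cons i l ih => simpa [bodyA] using ih

lemma bodyB_frozen (xs : List Int) (l : List Int) (prev kk : Int) :
    l.foldl (bodyB xs) (prev, kk, true) = (prev, kk, true) := by
  induction l with
  | nil => rfl
  | cons v l ih => simpa [bodyB] using ih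

lemma pyGetD_cons_pos (a : Int) (l : List Int) (i d : Int) (h : 1 ≤ i) :
    PySem.List.pyGetD (a :: l) i d = PySem.List.pyGetD l (i - 1) d := by
  by_cases hl : i < ((a :: l).length : Int)
  · rw [PySem.List.pyGetD_eq_getElem (a :: l) d (by omega) hl]
    have hl2 : i - 1 < (l.length : Int) := by simp at hl; omega
    rw [PySem.List.pyGetD_eq_getElem l d (by omega) hl2]
    have : i.toNat = (i - 1).toNat + 1 := by omega
    simp only [this, List.getElem_cons_succ]
  · rw [PySem.List.pyGetD_of_none, PySem.List.pyGetD_of_none]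
    · rw [PySem.List.pyGet?_eq_none_iff]
      simp only [PySem.Raise.InRange, not_and, not_lt]
      intro; simp at hl ⊢; omega
    · rw [PySem.List.pyGet?_eq_none_iff]
      simp only [PySem.Raise.InRange, not_and, not_lt]
      intro; simp at hl ⊢; omega

lemma surv_length (xs : List Int) (p : Int) :
    ((surv xs p).length : Int) = (xs.countP (fun x => decide (p < x)) : Int) := by
  have aux : ∀ (ys : List Int) (s0 : Int),
      ((PySem.List.enumerate ys s0).filter (fun q => decide (p < q.2))).length
        = ys.countP (fun x => decide (p < x)) := by
    intro ys
    induction ys with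
    | nil => intro s0; rfl
    | cons x t ih =>
      intro s0
      rw [PySem.List.enumerate_cons]
      by_cases hx : p < x
      · simp [hx, ih (s0 + 1)]
      · simp [hx, ih (s0 + 1)]
  simp [surv, aux xs 0]

lemma surv_mem (xs : List Int) (p j : Int) :
    j ∈ surv xs p ↔ 0 ≤ j ∧ j < xs.length ∧ p < PySem.List.pyGetD xs j 0 := by
  simp only [surv, List.mem_map, List.mem_filter, PySem.List.mem_enumerate_iff]
  constructor
  · rintro ⟨q, ⟨⟨kn, hk, rfl⟩, hq⟩, hj⟩
    simp only [zero_add] at hj hq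
    subst hj
    refine ⟨by positivity, by exact_mod_cast hk, ?_⟩
    rw [PySem.List.pyGetD_eq_getElem xs 0 (by positivity) (by exact_mod_cast hk)]
    simpa using hq
  · rintro ⟨h0, hN, hp⟩
    refine ⟨(j, xs[j.toNat]'(by omega)), ⟨⟨j.toNat, by omega, by simp; omega⟩, ?_⟩, rfl⟩
    rw [PySem.List.pyGetD_eq_getElem xs 0 h0 (by exact_mod_cast hN)] at hp
    simpa using hp

lemma surv_sorted (xs : List Int) (p : Int) : (surv xs p).Pairwise (· < ·) := by
  apply List.pairwise_map.mpr
  exact (PySem.List.pairwise_lt_enumerate xs 0).filter _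

lemma scan_spec (prev : Int) : ∀ (l : List Int) (s0 kk e0 : Int),
    (PySem.List.enumerate l s0).foldl (scanB prev) (kk, e0, false)
      = (if 1 ≤ kk ∧ kk ≤ ((((PySem.List.enumerate l s0).filter
            (fun q => decide (prev < q.2))).map (fun q => q.1)).length : Int)
         then (0, PySem.List.pyGetD (((PySem.List.enumerate l s0).filter
            (fun q => decide (prev < q.2))).map (fun q => q.1)) (kk - 1) 0, true)
         else (kk - ((((PySem.List.enumerate l s0).filter
            (fun q => decide (prev < q.2))).map (fun q => q.1)).length : Int), e0, false)) := by
  intro l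
  induction l with
  | nil =>
    intro s0 kk e0
    simp [PySem.List.enumerate_nil]
    omega
  | cons x t ih =>
    intro s0 kk e0
    rw [PySem.List.enumerate_cons]
    by_cases hx : prev < x
    · have hfc : (((s0, x) :: PySem.List.enumerate t (s0 + 1)).filter
          (fun q => decide (prev < q.2)))
          = (s0, x) :: ((PySem.List.enumerate t (s0 + 1)).filter
              (fun q => decide (prev < q.2))) :=
        List.filter_cons_of_pos (by simpa using hx)
      rw [hfc, List.map_cons, List.length_cons]
      by_cases hk1 : kk - 1 = 0
      · have hstep : scanB prev (kk, e0, false) (s0, x) = (0, s0, true) := by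
          simp [scanB, if_neg (by omega : ¬ x ≤ prev), hk1]
        rw [List.foldl_cons, hstep, scanB_frozen]
        rw [if_pos (by push_cast [List.length_cons]; omega)]
        rw [show kk - 1 = 0 from hk1, PySem.List.pyGetD_zero_cons]
      · have hstep : scanB prev (kk, e0, false) (s0, x) = (kk - 1, e0, false) := by
          simp [scanB, if_neg (by omega : ¬ x ≤ prev), hk1]
        rw [List.foldl_cons, hstep, ih (s0 + 1) (kk - 1) e0]
        by_cases hc : 1 ≤ kk - 1 ∧ kk - 1 ≤ ((((PySem.List.enumerate t (s0 + 1)).filter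
            (fun q => decide (prev < q.2))).map (fun q => q.1)).length : Int)
        · rw [if_pos hc, if_pos (by push_cast at hc ⊢; omega)]
          rw [pyGetD_cons_pos _ _ _ _ (by omega)]
        · rw [if_neg hc, if_neg (by push_cast at hc ⊢; omega)]
          refine Prod.ext ?_ rfl
          push_cast
          ring
    · have hfc : (((s0, x) :: PySem.List.enumerate t (s0 + 1)).filter
          (fun q => decide (prev < q.2)))
          = ((PySem.List.enumerate t (s0 + 1)).filter (fun q => decide (prev < q.2))) :=
        List.filter_cons_of_neg (by simpa using hx)
      rw [hfc]
      have hstep : scanB prev (kk, e0, false) (s0, x) = (kk, e0, false) := by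
        simp [scanB, if_pos (by omega : x ≤ prev)]
      rw [List.foldl_cons, hstep, ih (s0 + 1) kk e0]

lemma sum_drop (prev v : Int) (h : prev ≤ v) (xs : List Int) :
    ((xs.map (fun x => max (x - prev) 0)).sum : Int)
      ≤ (xs.map (fun x => max (x - v) 0)).sum
        + (xs.countP (fun x => decide (prev < x)) : Int) * (v - prev) := by
  induction xs with
  | nil => simp
  | cons x t ih =>
    rw [List.countP_cons]
    by_cases hx : prev < x
    · have h1 : max (x - prev) 0 ≤ max (x - v) 0 + (v - prev) := by omega
      have h2 : ((t.countP (fun x => decide (prev < x)) : Int) + 1) * (v - prev)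
          = (t.countP (fun x => decide (prev < x)) : Int) * (v - prev) + (v - prev) := by ring
      simp [hx]
      rw [h2]
      linarith
    · have h1 : max (x - prev) 0 = 0 := by omega
      have h1' : max (x - v) 0 = 0 := by omega
      simp [hx, h1, h1']
      linarith

lemma sum_zero (p : Int) (xs : List Int) (h : ∀ x ∈ xs, x ≤ p) :
    ((xs.map (fun x => max (x - p) 0)).sum : Int) = 0 := by
  induction xs with
  | nil => rfl
  | cons x t ih =>
    have hx : x ≤ p := h x (by simp)
    have ht := ih (fun y hy => h y (by simp [hy]))
    simp [ht]
    omega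

lemma min_is (xs : List Int) (prev v : Int) (hvmem : v ∈ xs) (hv : prev < v)
    (hmin : ∀ x ∈ xs, prev < x → v ≤ x) :
    PySem.List.min? (xs.filter (fun x => decide (prev < x))) (fun x => x) = some v := by
  have hvf : v ∈ xs.filter (fun x => decide (prev < x)) :=
    List.mem_filter.mpr ⟨hvmem, by simpa using hv⟩
  cases h : PySem.List.min? (xs.filter (fun x => decide (prev < x))) (fun x => x) with
  | none =>
    rw [PySem.List.min?_eq_none_iff] at h
    rw [h] at hvf
    simp at hvf
  | some m =>
    have hm1 := PySem.List.min?_mem h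
    rw [List.mem_filter] at hm1
    have hle : m ≤ v := PySem.List.min?_isMin h v hvf
    have hge : v ≤ m := hmin m hm1.1 (by simpa using hm1.2)
    rw [show m = v by omega]

lemma phi_break (xs : List Int) (prev k v : Int)
    (hm : PySem.List.min? (xs.filter (fun x => decide (prev < x))) (fun x => x) = some v)
    (h : k ≤ (xs.countP (fun x => decide (prev < x)) : Int) * (v - prev)) :
    phi xs prev k = (prev, k) := by
  rw [phi]
  split
  · rfl
  · rename_i v' heq
    rw [hm] at heq
    injection heq with heq
    subst heq
    simp [h]

lemma phi_none (xs : List Int) (prev k : Int)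
    (hm : PySem.List.min? (xs.filter (fun x => decide (prev < x))) (fun x => x) = none) :
    phi xs prev k = (prev, k) := by
  rw [phi]
  split
  · rfl
  · rename_i v' heq
    rw [hm] at heq
    cases heq

lemma phi_step (xs : List Int) (prev k v : Int)
    (hm : PySem.List.min? (xs.filter (fun x => decide (prev < x))) (fun x => x) = some v)
    (h : ¬ k ≤ (xs.countP (fun x => decide (prev < x)) : Int) * (v - prev)) :
    phi xs prev k
      = phi xs v (k - (xs.countP (fun x => decide (prev < x)) : Int) * (v - prev)) := by
  rw [phi]
  split
  · rename_i heq
    rw [hm] at heq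
    cases heq
  · rename_i v' heq
    rw [hm] at heq
    injection heq with heq
    subst heq
    simp [h]

lemma loopA (xs : List Int) (N : Int) (hN : N = xs.length) :
    ∀ (u pre : List Int) (mn k eat : Int),
    PySem.List.sorted xs (fun x => x) false = pre ++ u →
    (∀ x ∈ pre, x ≤ mn) → (0 ≤ mn) →
    k < ((xs.map (fun x => max (x - mn) 0)).sum : Int) →
    (0 ≤ k ∨ ∃ x ∈ u, mn < x) →
    ∃ v' k'',
      v' ∈ xs ∧ (phi xs mn k).1 < v' ∧
      (PySem.List.pyRange (N - u.length) N 1).foldl (bodyA xs N) (mn, mn, k, eat, false)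
        = (v', (phi xs mn k).1, k'',
           eatOf xs (phi xs mn k).1 (phi xs mn k).2 eat, true) := by
  have hperm := PySem.List.sorted_perm xs (fun x => x) false
  have hsp : (PySem.List.sorted xs (fun x => x) false).Pairwise (· ≤ ·) := by
    simpa using PySem.List.sorted_pairwise xs (fun x => x)
  have hlen : (PySem.List.sorted xs (fun x => x) false).length = xs.length :=
    hperm.length_eq
  intro u
  induction u with
  | nil =>
    intro pre mn k eat hu hpre hmn0 hrem hpos
    exfalso
    have hall : ∀ y ∈ xs, y ≤ mn := by
      intro y hy
      have : y ∈ PySem.List.sorted xs (fun x => x) false := hperm.mem_iff.mpr hy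
      rw [hu] at this
      simp at this
      exact hpre y this
    have hz := sum_zero mn xs hall
    rw [hz] at hrem
    rcases hpos with h | ⟨y, hy, _⟩
    · omega
    · simp at hy
  | cons x u' ih =>
    intro pre mn k eat hu hpre hmn0 hrem hpos
    have hulen : (PySem.List.sorted xs (fun x => x) false).length
        = pre.length + (u'.length + 1) := by
      rw [hu]; simp
    have hiN : N - (((x :: u').length : Int)) = (pre.length : Int) := by
      rw [hN, ← hlen, hulen]; push_cast [List.length_cons]; ring
    have hxmem : x ∈ xs := by
      apply hperm.mem_iff.mp
      rw [hu]; simp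
    have hxu : ∀ b ∈ u', x ≤ b := by
      intro b hb
      have := hsp
      rw [hu] at this
      have h2 := (List.pairwise_append.mp this).2.1
      exact List.rel_of_pairwise_cons h2 hb
    have hrange : PySem.List.pyRange (N - (((x :: u').length : Int))) N
        = (N - (((x :: u').length : Int))) :: PySem.List.pyRange (N - ((u'.length : Int))) N := by
      rw [PySem.List.pyRange_one_cons (by rw [hiN, hN, ← hlen, hulen]; push_cast [List.length_cons]; omega)]
      congr 2
      push_cast [List.length_cons]
      ring
    have hget : PySem.List.pyGetD (PySem.List.sorted xs (fun x => x) false)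
        (N - (((x :: u').length : Int))) 0 = x := by
      rw [hiN, PySem.List.pyGetD_natCast, hu, List.getD_eq_getElem?_getD,
        List.getElem?_append_right (le_refl pre.length)]
      simp
    rw [hrange, List.foldl_cons]
    by_cases hmx : mn < x
    · have hcount : (xs.countP (fun y => decide (mn < y)) : Int) = (((x :: u').length : Int)) := by
        have h1 : xs.countP (fun y => decide (mn < y))
            = (PySem.List.sorted xs (fun x => x) false).countP (fun y => decide (mn < y)) :=
          (hperm.countP_eq _).symm
        rw [h1, hu, List.countP_append]
        have h2 : pre.countP (fun y => decide (mn < y)) = 0 := by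
          rw [List.countP_eq_zero]
          intro a ha
          simpa using not_lt.mpr (hpre a ha)
        have h3 : (x :: u').countP (fun y => decide (mn < y)) = (x :: u').length := by
          rw [List.countP_eq_length]
          intro b hb
          rcases List.mem_cons.mp hb with h | h
          · simp [h, hmx]
          · have := hxu b h
            simp
            omega
        rw [h2, h3]
        simp
      have hmv : PySem.List.min? (xs.filter (fun y => decide (mn < y))) (fun y => y)
          = some x := by
        apply min_is xs mn x hxmem hmx
        intro z hz hmz
        have hzs : z ∈ PySem.List.sorted xs (fun x => x) false := hperm.mem_iff.mpr hz
        rw [hu] at hzs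
        rcases List.mem_append.mp hzs with h | h
        · exact absurd (hpre z h) (by omega)
        · rcases List.mem_cons.mp h with h | h
          · omega
          · exact hxu z h
      have hNi : N - (N - (((x :: u').length : Int))) = (((x :: u').length : Int)) := by ring
      by_cases hkc : k > (((x :: u').length : Int)) * (x - mn)
      · -- consume a whole round of the value x
        have hstep : bodyA xs N (mn, mn, k, eat, false) (N - (((x :: u').length : Int)))
            = (x, x, k - (((x :: u').length : Int)) * (x - mn), eat, false) := by
          simp only [bodyA, if_neg (Bool.false_ne_true)]
          rw [hget, if_pos hmx, hNi, if_pos hkc]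
        rw [hstep]
        have hprod : (1 : Int) ≤ (((x :: u').length : Int)) * (x - mn) := by
          have h1 : (1 : Int) ≤ (((x :: u').length : Int)) := by push_cast [List.length_cons]; omega
          nlinarith
        have hphi : phi xs mn k
            = phi xs x (k - (xs.countP (fun y => decide (mn < y)) : Int) * (x - mn)) := by
          apply phi_step xs mn k x hmv
          rw [hcount]
          omega
        rw [hphi, hcount]
        apply ih (pre ++ [x]) x (k - (((x :: u').length : Int)) * (x - mn)) eat
        · rw [hu, List.append_assoc]; rfl
        · intro a ha
          rcases List.mem_append.mp ha with h | h
          · have := hpre a h; omega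
          · simp at h; omega
        · omega
        · have hsd := sum_drop mn x (by omega) xs
          rw [hcount] at hsd
          omega
        · left; omega
      · -- break: A runs its inner countdown scan here
        have hphi : phi xs mn k = (mn, k) := by
          apply phi_break xs mn k x hmv
          rw [hcount]
          omega
        have hLsurv : ((surv xs mn).length : Int) = (((x :: u').length : Int)) := by
          rw [surv_length, hcount]
        set L : List Int := surv xs mn with hLdef
        have hscan : ∀ kk, scanA xs mn (kk, eat, false)
            = (if 1 ≤ kk ∧ kk ≤ (L.length : Int)
               then (0, PySem.List.pyGetD L (kk - 1) 0, true)
               else (kk - (L.length : Int), eat, false)) := by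
          intro kk
          rw [scanA_eq, scan_spec, hLdef]
          rfl
        have hmodeq : k - PySem.Int.floordiv k (((x :: u').length : Int))
            * (((x :: u').length : Int)) = PySem.Int.mod k (((x :: u').length : Int)) := by
          have := PySem.Int.floordiv_mul_add_mod k (((x :: u').length : Int))
          omega
        have hstep : bodyA xs N (mn, mn, k, eat, false) (N - (((x :: u').length : Int)))
            = (x, mn,
               (if k ≤ (((x :: u').length : Int))
                then (if 1 ≤ k ∧ k ≤ (L.length : Int) then (0 : Int) else k - (L.length : Int))
                else (if 1 ≤ PySem.Int.mod k (((x :: u').length : Int))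
                          ∧ PySem.Int.mod k (((x :: u').length : Int)) ≤ (L.length : Int)
                      then (0 : Int)
                      else PySem.Int.mod k (((x :: u').length : Int)) - (L.length : Int))),
               (if k ≤ (((x :: u').length : Int))
                then (if 1 ≤ k ∧ k ≤ (L.length : Int)
                      then PySem.List.pyGetD L (k - 1) 0 else eat)
                else (if 1 ≤ PySem.Int.mod k (((x :: u').length : Int))
                          ∧ PySem.Int.mod k (((x :: u').length : Int)) ≤ (L.length : Int)
                      then PySem.List.pyGetD L (PySem.Int.mod k (((x :: u').length : Int)) - 1) 0
                      else eat)),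
               true) := by
          simp only [bodyA, if_neg (Bool.false_ne_true)]
          rw [hget, if_pos hmx, hNi, if_neg hkc]
          by_cases hkl : k ≤ (((x :: u').length : Int))
          · simp only [if_pos hkl]
            rw [hscan k]
            by_cases hc1 : 1 ≤ k ∧ k ≤ (L.length : Int)
            · simp only [if_pos hc1]
            · simp only [if_neg hc1]
          · simp only [if_neg hkl]
            rw [hmodeq, hscan (PySem.Int.mod k (((x :: u').length : Int)))]
            by_cases hc1 : 1 ≤ PySem.Int.mod k (((x :: u').length : Int))
                ∧ PySem.Int.mod k (((x :: u').length : Int)) ≤ (L.length : Int)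
            · simp only [if_pos hc1]
            · simp only [if_neg hc1]
        have heat : eatOf xs mn k eat
            = (if k ≤ (((x :: u').length : Int))
               then (if 1 ≤ k ∧ k ≤ (L.length : Int)
                     then PySem.List.pyGetD L (k - 1) 0 else eat)
               else (if 1 ≤ PySem.Int.mod k (((x :: u').length : Int))
                         ∧ PySem.Int.mod k (((x :: u').length : Int)) ≤ (L.length : Int)
                     then PySem.List.pyGetD L (PySem.Int.mod k (((x :: u').length : Int)) - 1) 0
                     else eat)) := by
          simp only [eatOf]
          rw [show surv xs mn = L from hLdef.symm, hcount, hLsurv]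
          by_cases hkl : k ≤ (((x :: u').length : Int))
          · rw [if_neg (by omega : ¬ k > (((x :: u').length : Int))), if_pos hkl]
          · rw [if_pos (by omega : k > (((x :: u').length : Int))), if_neg hkl]
        rw [hstep, bodyA_frozen, hphi]
        exact ⟨x, _, hxmem, hmx, by rw [heat]⟩
    · -- duplicate of the current value: A skips it
      have hstep : bodyA xs N (mn, mn, k, eat, false) (N - (((x :: u').length : Int)))
          = (mn, mn, k, eat, false) := by
        simp only [bodyA, if_neg (Bool.false_ne_true)]
        rw [hget, if_neg hmx]
      rw [hstep]
      apply ih (pre ++ [x]) mn k eat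
      · rw [hu, List.append_assoc]; rfl
      · intro a ha
        rcases List.mem_append.mp ha with h | h
        · exact hpre a h
        · simp at h; subst h; omega
      · exact hmn0
      · exact hrem
      · rcases hpos with h | ⟨y, hy, hmy⟩
        · exact Or.inl h
        · right
          refine ⟨y, ?_, hmy⟩
          rcases List.mem_cons.mp hy with h | h
          · subst h; omega
          · exact h

lemma loopB (xs : List Int) :
    ∀ (vs : List Int) (prev k : Int),
    vs.Pairwise (· < ·) → (∀ v ∈ vs, prev ≤ v) → (∀ v ∈ vs, v ∈ xs) →
    (∀ x ∈ xs, prev < x → x ∈ vs) →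
    k < ((xs.map (fun x => max (x - prev) 0)).sum : Int) →
    (0 ≤ k ∨ ∃ v ∈ vs, prev < v) →
    vs.foldl (bodyB xs) (prev, k, false)
      = ((phi xs prev k).1, (phi xs prev k).2, true) := by
  intro vs
  induction vs with
  | nil =>
    intro prev k hpw hge hmem hcov hrem hpos
    exfalso
    have hz : ((xs.map (fun x => max (x - prev) 0)).sum : Int) = 0 := by
      apply sum_zero
      intro x hx
      by_contra hc
      have := hcov x hx (by omega)
      simp at this
    rw [hz] at hrem
    rcases hpos with h | ⟨v, hv, _⟩
    · omega
    · simp at hv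
  | cons v t ih =>
    intro prev k hpw hge hmem hcov hrem hpos
    have hvxs : v ∈ xs := hmem v (by simp)
    have hvge : prev ≤ v := hge v (by simp)
    have hc : ((xs.map (fun t => if prev < t then (1 : Int) else 0)).sum : Int)
        = (xs.countP (fun x => decide (prev < x)) : Int) := by
      simpa using PySem.List.sum_map_ite_one_zero (fun x => decide (prev < x)) xs
    have hpwt := List.pairwise_cons.mp hpw
    by_cases hk0 : k ≤ (xs.countP (fun x => decide (prev < x)) : Int) * (v - prev)
    · have hstep : bodyB xs (prev, k, false) v = (prev, k, true) := by
        simp only [bodyB, if_neg (Bool.false_ne_true)]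
        rw [hc, if_pos hk0]
      rw [List.foldl_cons, hstep, bodyB_frozen]
      have hphi : phi xs prev k = (prev, k) := by
        by_cases hvp : prev < v
        · have hmv : PySem.List.min? (xs.filter (fun x => decide (prev < x))) (fun x => x)
              = some v := by
            apply min_is xs prev v hvxs hvp
            intro x hx hpx
            rcases List.mem_cons.mp (hcov x hx hpx) with h | h
            · omega
            · exact le_of_lt (hpwt.1 x h)
          exact phi_break xs prev k v hmv hk0
        · have hk' : k ≤ 0 := by
            rw [show v = prev by omega] at hk0
            simpa using hk0
          cases hmq : PySem.List.min? (xs.filter (fun x => decide (prev < x))) (fun x => x) with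
          | none => rw [phi, hmq]
          | some m =>
            have hm1 := PySem.List.min?_mem hmq
            rw [List.mem_filter] at hm1
            have hm2 : prev < m := by simpa using hm1.2
            apply phi_break xs prev k m hmq
            have : (0 : Int) ≤ (xs.countP (fun x => decide (prev < x)) : Int) * (m - prev) :=
              mul_nonneg (by positivity) (by omega)
            omega
      rw [hphi]
    · by_cases hvp : prev < v
      · -- consume the value v
        have hmv : PySem.List.min? (xs.filter (fun x => decide (prev < x))) (fun x => x)
            = some v := by
          apply min_is xs prev v hvxs hvp
          intro x hx hpx
          rcases List.mem_cons.mp (hcov x hx hpx) with h | h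
          · omega
          · exact le_of_lt (hpwt.1 x h)
        have hstep : bodyB xs (prev, k, false) v
            = (v, k - (xs.countP (fun x => decide (prev < x)) : Int) * (v - prev), false) := by
          simp only [bodyB, if_neg (Bool.false_ne_true)]
          rw [hc, if_neg hk0]
        rw [List.foldl_cons, hstep, phi_step xs prev k v hmv hk0]
        have hcnt1 : (0 : Int) < (xs.countP (fun x => decide (prev < x)) : Int) := by
          have : 0 < xs.countP (fun x => decide (prev < x)) := by
            rw [List.countP_pos_iff]
            exact ⟨v, hvxs, by simpa using hvp⟩
          omega
        have hprod : (1 : Int) ≤ (xs.countP (fun x => decide (prev < x)) : Int) * (v - prev) := by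
          nlinarith
        apply ih v _ hpwt.2 (fun w hw => le_of_lt (hpwt.1 w hw)) (fun w hw => hmem w (by simp [hw]))
        · intro x hx hvx
          rcases List.mem_cons.mp (hcov x hx (by omega)) with h | h
          · omega
          · exact h
        · have := sum_drop prev v (by omega) xs
          omega
        · left; omega
      · -- v = prev: a no-op round
        have hvp' : v = prev := by omega
        have hstep : bodyB xs (prev, k, false) v = (prev, k, false) := by
          simp only [bodyB, if_neg (Bool.false_ne_true)]
          rw [hc, if_neg hk0, hvp']
          simp
        rw [List.foldl_cons, hstep]
        have hk1 : (0 : Int) ≤ k := by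
          rw [hvp'] at hk0
          simp at hk0
          omega
        apply ih prev _ hpwt.2 (fun w hw => by have := hpwt.1 w hw; omega)
          (fun w hw => hmem w (by simp [hw]))
        · intro x hx hvx
          rcases List.mem_cons.mp (hcov x hx hvx) with h | h
          · omega
          · exact h
        · exact hrem
        · left; exact hk1

lemma whileW1 (xs : List Int) (prev N : Int) (hN : N = xs.length) :
    ∀ (fuel : Nat) (e i0 : Int), i0 ∈ surv xs prev → 0 ≤ e → e ≤ i0 →
    (∀ j ∈ surv xs prev, e ≤ j → i0 ≤ j) → (i0 - e).toNat ≤ fuel →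
    whileA xs prev N fuel e = i0 := by
  intro fuel
  induction fuel with
  | zero =>
    intro e i0 hi0 he0 hei hmin hf
    have : e = i0 := by omega
    subst this
    rfl
  | succ f ih =>
    intro e i0 hi0 he0 hei hmin hf
    have hi0' := (surv_mem xs prev i0).mp hi0
    by_cases he : e = i0
    · subst he
      rw [whileA, if_neg (by omega)]
    · have hecond : PySem.List.pyGetD xs e 0 ≤ prev := by
        by_contra hc
        have : e ∈ surv xs prev := (surv_mem xs prev e).mpr ⟨he0, by omega, by omega⟩
        have := hmin e this le_rfl
        omega
      rw [whileA, if_pos hecond]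
      have hmod : PySem.Int.mod (e + 1) N = e + 1 := by
        rw [PySem.Int.mod_eq_emod_of_pos (by omega)]
        exact Int.emod_eq_of_lt (by omega) (by omega)
      rw [hmod]
      exact ih (e + 1) i0 hi0 (by omega) (by omega)
        (fun j hj hje => hmin j hj (by omega)) (by omega)

lemma whileW2 (xs : List Int) (prev N : Int) (hN : N = xs.length) :
    ∀ (fuel : Nat) (e i0 : Int), i0 ∈ surv xs prev → 0 ≤ e → e < N →
    (∀ j ∈ surv xs prev, i0 ≤ j) → (∀ j ∈ surv xs prev, j < e) →
    ((N - e).toNat + i0.toNat ≤ fuel) →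
    whileA xs prev N fuel e = i0 := by
  intro fuel
  induction fuel with
  | zero =>
    intro e i0 hi0 he0 heN hmin hlt hf
    have hi0' := (surv_mem xs prev i0).mp hi0
    omega
  | succ f ih =>
    intro e i0 hi0 he0 heN hmin hlt hf
    have hi0' := (surv_mem xs prev i0).mp hi0
    have hecond : PySem.List.pyGetD xs e 0 ≤ prev := by
      by_contra hc
      have : e ∈ surv xs prev := (surv_mem xs prev e).mpr ⟨he0, by omega, by omega⟩
      have := hlt e this
      omega
    rw [whileA, if_pos hecond]
    by_cases hN1 : e = N - 1
    · have hmod : PySem.Int.mod (e + 1) N = 0 := by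
        rw [PySem.Int.mod_eq_emod_of_pos (by omega), hN1]
        simp
      rw [hmod]
      exact whileW1 xs prev N hN f 0 i0 hi0 le_rfl (by omega)
        (fun j hj _ => hmin j hj) (by omega)
    · have hmod : PySem.Int.mod (e + 1) N = e + 1 := by
        rw [PySem.Int.mod_eq_emod_of_pos (by omega)]
        exact Int.emod_eq_of_lt (by omega) (by omega)
      rw [hmod]
      exact ih (e + 1) i0 hi0 (by omega) (by omega) hmin
        (fun j hj => by have := hlt j hj; omega) (by omega)

lemma cyc (xs : List Int) (prev p N : Int) (hN : N = xs.length)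
    (hne : surv xs prev ≠ []) (hp0 : 0 ≤ p) (hpN : p < N) :
    whileA xs prev N N.toNat (PySem.Int.mod (p + 1) N)
      = (((surv xs prev).find? (fun i => decide (p < i))).getD
          (PySem.List.pyGetD (surv xs prev) 0 0)) := by
  obtain ⟨h0, tl, hsv⟩ : ∃ h0 tl, surv xs prev = h0 :: tl := by
    cases hh : surv xs prev with
    | nil => exact absurd hh hne
    | cons a b => exact ⟨a, b, rfl⟩
  have hh0 : h0 ∈ surv xs prev := by rw [hsv]; simp
  have hh0' := (surv_mem xs prev h0).mp hh0
  have hh0min : ∀ j ∈ surv xs prev, h0 ≤ j := by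
    intro j hj
    rw [hsv] at hj
    rcases List.mem_cons.mp hj with h | h
    · omega
    · have := surv_sorted xs prev
      rw [hsv] at this
      exact le_of_lt (List.rel_of_pairwise_cons this h)
  have hget0 : PySem.List.pyGetD (surv xs prev) 0 0 = h0 := by
    rw [hsv, PySem.List.pyGetD_zero_cons]
  have hNpos : (0 : Int) < N := by omega
  by_cases hp1 : p = N - 1
  · have hmod : PySem.Int.mod (p + 1) N = 0 := by
      rw [PySem.Int.mod_eq_emod_of_pos hNpos, hp1]
      simp
    have hfind : (surv xs prev).find? (fun i => decide (p < i)) = none := by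
      rw [List.find?_eq_none]
      intro j hj
      have := (surv_mem xs prev j).mp hj
      simp
      omega
    rw [hmod, hfind, Option.getD_none, hget0]
    exact whileW1 xs prev N hN N.toNat 0 h0 hh0 le_rfl (by omega)
      (fun j hj _ => hh0min j hj) (by omega)
  · have hmod : PySem.Int.mod (p + 1) N = p + 1 := by
      rw [PySem.Int.mod_eq_emod_of_pos hNpos]
      exact Int.emod_eq_of_lt (by omega) (by omega)
    rw [hmod]
    cases hfind : (surv xs prev).find? (fun i => decide (p < i)) with
    | none =>
      rw [List.find?_eq_none] at hfind
      have hall : ∀ j ∈ surv xs prev, j ≤ p := by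
        intro j hj
        have := hfind j hj
        simp at this
        omega
      rw [Option.getD_none, hget0]
      exact whileW2 xs prev N hN N.toNat (p + 1) h0 hh0 (by omega) (by omega)
        hh0min (fun j hj => by have := hall j hj; omega)
        (by have := hall h0 hh0; omega)
    | some i0 =>
      rw [Option.getD_some]
      obtain ⟨hpi0, l1, l2, hdec, hl1⟩ := List.find?_eq_some_iff_append.mp hfind
      have hpi0' : p < i0 := by simpa using hpi0
      have hi0mem : i0 ∈ surv xs prev := by rw [hdec]; simp
      have hi0' := (surv_mem xs prev i0).mp hi0mem
      have hsorted := surv_sorted xs prev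
      rw [hdec] at hsorted
      have hpw := (List.pairwise_append.mp hsorted)
      refine whileW1 xs prev N hN N.toNat (p + 1) i0 hi0mem (by omega) (by omega)
        ?_ (by omega)
      intro j hj hje
      rw [hdec] at hj
      rcases List.mem_append.mp hj with h | h
      · have := hl1 j h
        simp at this
        omega
      · rcases List.mem_cons.mp h with h | h
        · omega
        · exact le_of_lt (List.rel_of_pairwise_cons hpw.2.1 h)

lemma sum_le_map_max (l : List Int) : l.sum ≤ (l.map (fun x => max (x - 0) 0)).sum := by
  induction l with
  | nil => simp
  | cons y t ih =>
    simp only [List.sum_cons, List.map_cons]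
    omega

-- ===== C (spent time) lemmas and the phase-1 characterization =====

lemma cntC (xs : List Int) (p : Int) (h0 : 0 ≤ p) :
    Cspent xs (p + 1) - Cspent xs p = (xs.countP (fun t => decide (p < t)) : Int) := by
  induction xs with
  | nil => rfl
  | cons t r ih =>
    simp only [Cspent, List.countP_cons]
    by_cases h : p < t
    · simp only [h, decide_true, if_pos]
      push_cast
      omega
    · simp only [h, decide_false]
      push_cast
      omega

lemma C_zero (xs : List Int) : Cspent xs 0 = 0 := by
  induction xs with
  | nil => rfl
  | cons t l ih => simp only [Cspent, ih]; omega

lemma C_mono (xs : List Int) (p q : Int) (h0 : 0 ≤ p) (hpq : p ≤ q) :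
    Cspent xs p ≤ Cspent xs q := by
  induction xs with
  | nil => simp [Cspent]
  | cons t l ih => simp only [Cspent]; omega

lemma C_step (xs : List Int) (p v : Int) (h0 : 0 ≤ p) (hpv : p < v)
    (hmin : ∀ t ∈ xs, p < t → v ≤ t) :
    Cspent xs v = Cspent xs p + (xs.countP (fun t => decide (p < t)) : Int) * (v - p) := by
  induction xs with
  | nil => simp [Cspent]
  | cons t l ih =>
    have hmt := hmin t (by simp)
    have ihl := ih (fun y hy => hmin y (by simp [hy]))
    simp only [Cspent, List.countP_cons]
    by_cases ht : p < t
    · have hvt : v ≤ t := hmt ht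
      have h1 : min (max t 0) v = v := by omega
      have h2 : min (max t 0) p = p := by omega
      simp only [ht, decide_true, if_pos]
      push_cast
      rw [h1, h2, ihl]
      ring
    · have h1 : min (max t 0) v = min (max t 0) p := by omega
      simp only [ht, decide_false]
      push_cast
      rw [h1, ihl]
      ring

lemma phi_char (xs : List Int) (k0 : Int) : ∀ (n : Nat) (prev k : Int),
    xs.countP (fun x => decide (prev < x)) = n →
    0 ≤ prev → 0 ≤ k → k = k0 - Cspent xs prev →
    (prev = 0 ∨ (prev ∈ xs ∧ 0 < prev ∧ Cspent xs prev < k0)) →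
    0 ≤ (phi xs prev k).2 ∧
    (phi xs prev k).2 = k0 - Cspent xs (phi xs prev k).1 ∧
    ((phi xs prev k).1 = 0 ∨
      ((phi xs prev k).1 ∈ xs ∧ 0 < (phi xs prev k).1 ∧ Cspent xs (phi xs prev k).1 < k0)) ∧
    (∀ v ∈ xs, (phi xs prev k).1 < v → k0 ≤ Cspent xs v) ∧
    0 ≤ (phi xs prev k).1 := by
  intro n
  induction n using Nat.strong_induction_on with
  | _ n ih =>
    intro prev k hn hprev hk hkC hchar
    cases hm : PySem.List.min? (xs.filter (fun x => decide (prev < x))) (fun x => x) with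
    | none =>
      rw [phi_none xs prev k hm]
      have hemp : xs.filter (fun x => decide (prev < x)) = [] :=
        (PySem.List.min?_eq_none_iff _ _).mp hm
      refine ⟨hk, hkC, hchar, ?_, hprev⟩
      intro v hv hpv
      exfalso
      have : v ∈ xs.filter (fun x => decide (prev < x)) :=
        List.mem_filter.mpr ⟨hv, by simpa using hpv⟩
      rw [hemp] at this
      simp at this
    | some v =>
      have hvf := PySem.List.min?_mem hm
      rw [List.mem_filter] at hvf
      have hpv : prev < v := by simpa using hvf.2
      have hvmin : ∀ t ∈ xs, prev < t → v ≤ t := by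
        intro t ht hpt
        exact PySem.List.min?_isMin hm t (List.mem_filter.mpr ⟨ht, by simpa using hpt⟩)
      have hCs := C_step xs prev v hprev hpv hvmin
      set c : Int := (xs.countP (fun x => decide (prev < x)) : Int) with hcdef
      by_cases hbr : k ≤ c * (v - prev)
      · rw [phi_break xs prev k v hm hbr]
        refine ⟨hk, hkC, hchar, ?_, hprev⟩
        intro w hw hpw
        have hvw : v ≤ w := hvmin w hw hpw
        have : k0 ≤ Cspent xs v := by
          rw [hCs]
          omega
        calc k0 ≤ Cspent xs v := this
          _ ≤ Cspent xs w := C_mono xs v w (by omega) hvw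
      · rw [phi_step xs prev k v hm hbr]
        have hdec : xs.countP (fun x => decide (v < x)) < n := by
          rw [← hn]
          rw [List.countP_eq_length_filter, List.countP_eq_length_filter]
          have h1 : xs.filter (fun x => decide (v < x))
              = (xs.filter (fun x => decide (prev < x))).filter (fun x => decide (v < x)) := by
            rw [List.filter_filter]
            apply List.filter_congr
            intro x _
            by_cases h : v < x
            · simp [h]
              omega
            · simp [h]
          rw [h1, List.length_filter_lt_length_iff_exists]
          exact ⟨v, List.mem_filter.mpr ⟨hvf.1, by simpa using hpv⟩, by simp⟩
        apply ih _ hdec v (k - c * (v - prev)) rfl (by omega) (by omega) (by omega)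
        right
        exact ⟨hvf.1, by omega, by omega⟩

-- under the stated characterization the threshold is unique
lemma char_unique (xs : List Int) (k : Int) (p p' : Int)
    (hp : p = 0 ∨ (p ∈ xs ∧ 0 < p ∧ Cspent xs p < k))
    (hap : ∀ v ∈ xs, p < v → k ≤ Cspent xs v)
    (hp' : p' = 0 ∨ (p' ∈ xs ∧ 0 < p' ∧ Cspent xs p' < k))
    (hap' : ∀ v ∈ xs, p' < v → k ≤ Cspent xs v) :
    p = p' := by
  rcases lt_trichotomy p p' with h | h | h
  · rcases hp' with h0 | ⟨hm, hpos, hC⟩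
    · rcases hp with h1 | ⟨_, hpos1, _⟩ <;> omega
    · have := hap p' hm h
      omega
  · exact h
  · rcases hp with h0 | ⟨hm, hpos, hC⟩
    · rcases hp' with h1 | ⟨_, hpos1, _⟩ <;> omega
    · have := hap' p hm h
      omega

-- ===== find? on a strictly sorted list =====

lemma find_succ (s : List Int) (hs : s.Pairwise (· < ·)) :
    ∀ (j : Nat) (hj : j + 1 < s.length),
    s.find? (fun i => decide (s[j]'(by omega) < i)) = some (s[j + 1]'hj) := by
  induction s with
  | nil => intro j hj; simp at hj
  | cons a t ih =>
    rcases List.pairwise_cons.mp hs with ⟨ha, ht⟩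
    intro j hj
    cases j with
    | zero =>
      simp only [List.getElem_cons_zero]
      cases t with
      | nil => simp at hj
      | cons b t' =>
        rw [List.find?_cons_of_neg (by simp)]
        rw [List.find?_cons_of_pos (by simp [ha b (by simp)])]
        simp
    | succ j' =>
      have hj' : j' + 1 < t.length := by
        simp only [List.length_cons] at hj
        omega
      simp only [List.getElem_cons_succ]
      have hmem : t[j']'(by omega) ∈ t := List.getElem_mem _
      rw [List.find?_cons_of_neg
        (by simp only [decide_eq_true_eq, not_lt]; exact le_of_lt (ha _ hmem))]
      exact ih ht j' hj'

lemma sorted_le_last (s : List Int) (hs : s.Pairwise (· < ·)) (hne : s ≠ [])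
    (x : Int) (hx : x ∈ s) : x ≤ s[s.length - 1]'(by cases s; simp at hne; simp) := by
  obtain ⟨i, hi, rfl⟩ := List.mem_iff_getElem.mp hx
  rcases Nat.lt_or_ge i (s.length - 1) with h | h
  · exact le_of_lt ((List.pairwise_iff_getElem.mp hs) i (s.length - 1) hi (by omega) h)
  · have : i = s.length - 1 := by omega
    subst this
    rfl

lemma sorted_head_zero (s : List Int) (hs : s.Pairwise (· < ·))
    (hpos : ∀ i ∈ s, 0 ≤ i) (a : Int) (t : List Int) (hcons : s = a :: t) (h0 : (0:Int) ∈ s) :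
    a = 0 := by
  subst hcons
  rcases List.mem_cons.mp h0 with h | h
  · omega
  · have := List.rel_of_pairwise_cons hs h
    have := hpos a (by simp)
    omega

-- the tail computation: A's "advance cyclically past the reported index" equals B's direct
-- modular index, outside the D-condition
lemma tail_eq (s : List Int) (L k' eat rA : Int)
    (hs : s.Pairwise (· < ·)) (hpos : ∀ i ∈ s, 0 ≤ i)
    (hL : L = (s.length : Int)) (hL1 : 1 ≤ L) (hk' : 0 ≤ k')
    (hrA : rA = if k' > L then PySem.Int.mod k' L else k')
    (heat : eat = if 1 ≤ rA ∧ rA ≤ L then PySem.List.pyGetD s (rA - 1) 0 else 0)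
    (hnd : ¬ (2 ≤ L ∧ PySem.List.pyGetD s 0 0 = 0 ∧ k' % L = 0 ∧ k' ≠ L)) :
    ((s.find? (fun i => decide (eat < i))).getD (PySem.List.pyGetD s 0 0))
      = PySem.List.pyGetD s (PySem.Int.mod k' L) 0 := by
  have hLpos : (0 : Int) < L := by omega
  have hmod : PySem.Int.mod k' L = k' % L := PySem.Int.mod_eq_emod_of_pos hLpos
  have hm0 : 0 ≤ k' % L := Int.emod_nonneg k' (by omega)
  have hmL : k' % L < L := Int.emod_lt_of_pos k' hLpos
  obtain ⟨a, t, hcons⟩ : ∃ a t, s = a :: t := by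
    cases s with
    | nil => simp [hL] at hL1
    | cons a t => exact ⟨a, t, rfl⟩
  have ha0 : 0 ≤ a := hpos a (by rw [hcons]; simp)
  -- the "rA = 0" situation: eat = 0 and we must pick the first survivor
  have hzero_case : eat = 0 → k' % L = 0 → k' ≠ L →
      ((s.find? (fun i => decide (eat < i))).getD (PySem.List.pyGetD s 0 0))
        = PySem.List.pyGetD s (PySem.Int.mod k' L) 0 := by
    intro he hm hkl
    rw [he, hmod, hm, PySem.List.pyGetD_zero, hcons]
    simp only [List.getD_cons_zero]
    by_cases haz : a = 0
    · -- first survivor is index 0: only fine when it is the sole survivor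
      cases t with
      | nil =>
        subst haz
        simp
      | cons b t' =>
        exfalso
        apply hnd
        refine ⟨by rw [hL, hcons]; simp; omega, ?_, hm, hkl⟩
        rw [hcons, PySem.List.pyGetD_zero]
        simpa using haz
    · rw [List.find?_cons_of_pos (by simp; omega)]
      simp
  by_cases hgt : k' > L
  · rw [hrA] at heat
    rw [if_pos hgt, hmod] at heat
    by_cases hr1 : 1 ≤ k' % L
    · -- eat = s[k'%L - 1]; the next survivor is s[k'%L]
      rw [if_pos ⟨by omega, by omega⟩] at heat
      have hj : (k' % L - 1).toNat + 1 < s.length := by omega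
      have hgetp : PySem.List.pyGetD s (k' % L - 1) 0 = s[(k' % L - 1).toNat]'(by omega) :=
        PySem.List.pyGetD_eq_getElem s 0 (by omega) (by omega)
      rw [heat, hgetp, find_succ s hs (k' % L - 1).toNat hj, Option.getD_some, hmod,
        PySem.List.pyGetD_eq_getElem s 0 (by omega) (by omega)]
      congr 1
      omega
    · exact hzero_case (by rw [heat, if_neg (show ¬ (1 ≤ k' % L ∧ k' % L ≤ L) by omega)]) (by omega) (by omega)
  · rw [hrA] at heat
    rw [if_neg hgt] at heat
    by_cases hk1 : 1 ≤ k'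
    · rw [if_pos ⟨hk1, by omega⟩] at heat
      by_cases hkL : k' = L
      · -- eat is the last survivor: wrap to the first
        have hmodL : k' % L = 0 := by
          subst hkL
          simp
        have hlast : PySem.List.pyGetD s (k' - 1) 0 = s[s.length - 1]'(by
            cases s; simp at hL; omega; simp) := by
          rw [PySem.List.pyGetD_eq_getElem s 0 (by omega) (by omega)]
          congr 1
          omega
        have hfind : s.find? (fun i => decide (eat < i)) = none := by
          rw [List.find?_eq_none]
          intro x hx
          simp only [heat, hlast, decide_eq_true_eq, not_lt]
          exact sorted_le_last s hs (by rw [hcons]; simp) x hx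
        rw [hfind, Option.getD_none, hmod, hmodL]
      · -- 1 ≤ k' < L: next survivor after s[k'-1] is s[k']
        have hj : (k' - 1).toNat + 1 < s.length := by omega
        have hgetp : PySem.List.pyGetD s (k' - 1) 0 = s[(k' - 1).toNat]'(by omega) :=
          PySem.List.pyGetD_eq_getElem s 0 (by omega) (by omega)
        have hmodk : k' % L = k' := Int.emod_eq_of_lt (by omega) (by omega)
        rw [heat, hgetp, find_succ s hs (k' - 1).toNat hj, Option.getD_some, hmod, hmodk,
          PySem.List.pyGetD_eq_getElem s 0 (by omega) (by omega)]
        congr 1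
        omega
    · -- k' = 0
      have hk0 : k' = 0 := by omega
      have he0 : eat = 0 := by rw [heat, if_neg (show ¬ (1 ≤ k' ∧ k' ≤ L) by omega)]
      have hm : k' % L = 0 := by rw [hk0]; exact Int.zero_emod L
      have hklg : k' ≠ L := by omega
      exact hzero_case he0 hm hklg

-- the shared skeleton: inside Pre_ with sum > k, both phases agree and the two tails are the
-- stated expressions over the survivor list at the phase-1 threshold
lemma main_shape (xs : List Int) (k : Int) (hk : 0 ≤ k) (hsum : ¬ xs.sum ≤ k) :
    ∃ p' k',
      (phi xs 0 k).1 = p' ∧ (phi xs 0 k).2 = k' ∧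
      0 ≤ k' ∧ k' = k - Cspent xs p' ∧
      (p' = 0 ∨ (p' ∈ xs ∧ 0 < p' ∧ Cspent xs p' < k)) ∧
      (∀ v ∈ xs, p' < v → k ≤ Cspent xs v) ∧ 0 ≤ p' ∧
      (0 : Int) < (xs.countP (fun x => decide (p' < x)) : Int) ∧
      solution xs k
        = (((surv xs p').find? (fun i => decide (eatOf xs p' k' 0 < i))).getD
            (PySem.List.pyGetD (surv xs p') 0 0)) + 1 ∧
      solution_alt xs k
        = PySem.List.pyGetD (surv xs p')
            (PySem.Int.mod k' ((surv xs p').length : Int)) 0 + 1 := by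
  have hperm := PySem.List.sorted_perm xs (fun x => x) false
  have hslen : (PySem.List.sorted xs (fun x => x) false).length = xs.length :=
    hperm.length_eq
  have hsumle := sum_le_map_max xs
  have hrem : k < (xs.map (fun x => max (x - 0) 0)).sum := by omega
  obtain ⟨v', k'', hv'mem, hv'gt, hfold⟩ :=
    loopA xs (xs.length : Int) rfl (PySem.List.sorted xs (fun x => x) false) [] 0 k 0
      (by simp) (by simp) le_rfl hrem (Or.inl hk)
  rw [show ((xs.length : Int) - ((PySem.List.sorted xs (fun x => x) false).length : Int)) = 0
    from by rw [hslen]; ring] at hfold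
  have hmemvs : ∀ x ∈ xs, 0 < x →
      x ∈ PySem.List.sorted
        (PySem.Set.ofList (xs.filter (fun t => decide (0 < t)))) (fun x => x) false := by
    intro x hx hx0
    refine (PySem.List.mem_sorted _ (fun x => x) false x).mpr ?_
    refine (PySem.Set.mem_ofList _ x).mpr ?_
    exact List.mem_filter.mpr ⟨hx, by simpa using hx0⟩
  have hmemxs : ∀ v, v ∈ PySem.List.sorted
      (PySem.Set.ofList (xs.filter (fun t => decide (0 < t)))) (fun x => x) false →
      v ∈ xs ∧ 0 < v := by
    intro v hv
    have := (PySem.List.mem_sorted _ (fun x => x) false v).mp hv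
    have := (PySem.Set.mem_ofList _ v).mp this
    have h2 := List.mem_filter.mp this
    exact ⟨h2.1, by simpa using h2.2⟩
  have hfoldB := loopB xs
    (PySem.List.sorted (PySem.Set.ofList (xs.filter (fun t => decide (0 < t))))
      (fun x => x) false) 0 k
    (by simpa using PySem.List.sorted_ofList_pairwise_lt (xs.filter (fun t => decide (0 < t))))
    (fun v hv => le_of_lt (hmemxs v hv).2)
    (fun v hv => (hmemxs v hv).1)
    (fun x hx hx0 => hmemvs x hx hx0)
    hrem (Or.inl hk)
  obtain ⟨hk'0, hk'C, hchar, hall, hp'0⟩ :=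
    phi_char xs k (xs.countP (fun x => decide ((0:Int) < x))) 0 k rfl le_rfl hk
      (by rw [C_zero]; ring) (Or.inl rfl)
  refine ⟨(phi xs 0 k).1, (phi xs 0 k).2, rfl, rfl, hk'0, by rw [hk'C], hchar, hall, hp'0, ?_, ?_, ?_⟩
  · have : 0 < xs.countP (fun x => decide ((phi xs 0 k).1 < x)) := by
      rw [List.countP_pos_iff]
      exact ⟨v', hv'mem, by simpa using hv'gt⟩
    omega
  · -- A's shape
    have hcpos : (0 : Int) < (xs.countP (fun x => decide ((phi xs 0 k).1 < x)) : Int) := by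
      have : 0 < xs.countP (fun x => decide ((phi xs 0 k).1 < x)) := by
        rw [List.countP_pos_iff]
        exact ⟨v', hv'mem, by simpa using hv'gt⟩
      omega
    have hsurvlen := surv_length xs (phi xs 0 k).1
    have hsurvne : surv xs (phi xs 0 k).1 ≠ [] := by
      intro hnil
      rw [hnil] at hsurvlen
      simp at hsurvlen
      omega
    have hNpos : (0 : Int) < (xs.length : Int) := by
      cases hsv : surv xs (phi xs 0 k).1 with
      | nil => exact absurd hsv hsurvne
      | cons a b =>
        have := (surv_mem xs (phi xs 0 k).1 a).mp (by rw [hsv]; simp)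
        omega
    have hr_le : (if (phi xs 0 k).2 > (xs.countP (fun x => decide ((phi xs 0 k).1 < x)) : Int)
        then PySem.Int.mod (phi xs 0 k).2 (xs.countP (fun x => decide ((phi xs 0 k).1 < x)) : Int)
        else (phi xs 0 k).2)
        ≤ (xs.countP (fun x => decide ((phi xs 0 k).1 < x)) : Int) := by
      by_cases hgt : (phi xs 0 k).2 > (xs.countP (fun x => decide ((phi xs 0 k).1 < x)) : Int)
      · rw [if_pos hgt]
        exact le_of_lt (PySem.Int.mod_lt (phi xs 0 k).2 hcpos)
      · rw [if_neg hgt]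
        omega
    have hpbounds : 0 ≤ eatOf xs (phi xs 0 k).1 (phi xs 0 k).2 0 ∧
        eatOf xs (phi xs 0 k).1 (phi xs 0 k).2 0 < (xs.length : Int) := by
      simp only [eatOf]
      by_cases h1 : 1 ≤ (if (phi xs 0 k).2 > (xs.countP (fun x => decide ((phi xs 0 k).1 < x)) : Int)
          then PySem.Int.mod (phi xs 0 k).2 (xs.countP (fun x => decide ((phi xs 0 k).1 < x)) : Int)
          else (phi xs 0 k).2)
      · rw [if_pos ⟨h1, hr_le⟩]
        have hmem : PySem.List.pyGetD (surv xs (phi xs 0 k).1)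
            ((if (phi xs 0 k).2 > (xs.countP (fun x => decide ((phi xs 0 k).1 < x)) : Int)
              then PySem.Int.mod (phi xs 0 k).2
                (xs.countP (fun x => decide ((phi xs 0 k).1 < x)) : Int)
              else (phi xs 0 k).2) - 1) 0
            ∈ surv xs (phi xs 0 k).1 := by
          apply PySem.List.pyGetD_mem
          constructor
          · omega
          · omega
        have := (surv_mem xs (phi xs 0 k).1 _).mp hmem
        exact ⟨this.1, by omega⟩
      · rw [if_neg (by intro hc; exact h1 hc.1)]
        omega
    rw [solution, if_neg hsum]
    simp only [PySem.List.len_eq, hfold]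
    rw [cyc xs (phi xs 0 k).1 (eatOf xs (phi xs 0 k).1 (phi xs 0 k).2 0) (xs.length : Int) rfl
      hsurvne hpbounds.1 hpbounds.2]
  · rw [solution_alt, if_neg hsum]
    simp only [PySem.List.len_eq, hfoldB]
    rfl

-- ===== VERDICT =====

theorem solution_spec : Claim_unchanged_solution := by
  intro xs k _ hpre hnd
  show solution xs k = solution_alt xs k
  by_cases hsum : xs.sum ≤ k
  · rw [solution, solution_alt, if_pos hsum, if_pos hsum]
  · have hk : 0 ≤ k := by
      rcases hpre with h | h
      · exact h
      · exact absurd h hsum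
    obtain ⟨p', k', hp'eq, hk'eq, hk'0, hk'C, hchar, hall, hp'0, hcpos, hA, hB⟩ :=
      main_shape xs k hk hsum
    rw [hA, hB]
    congr 1
    have hsurvlen := surv_length xs p'
    -- feed the ¬D hypothesis to the tail lemma
    apply tail_eq (surv xs p') ((surv xs p').length : Int) k'
      (eatOf xs p' k' 0)
      (if k' > ((surv xs p').length : Int)
       then PySem.Int.mod k' ((surv xs p').length : Int) else k')
      (surv_sorted xs p')
      (fun i hi => ((surv_mem xs p' i).mp hi).1)
      rfl (by omega) hk'0
      (by rw [hsurvlen])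
      (by simp only [eatOf]; rw [hsurvlen])
    -- ¬ (2 ≤ L ∧ s[0] = 0 ∧ k' % L = 0 ∧ k' ≠ L), else D would hold via the witness p'
    intro ⟨h2, hs0, hm0, hkl⟩
    apply hnd
    refine ⟨hk, by omega, p', ?_, ?_, hall, ?_, ?_, ?_, ?_⟩
    · rcases hchar with h | ⟨hm, _, _⟩
      · simp [h]
      · exact List.mem_cons_of_mem _ hm
    · rcases hchar with h | ⟨_, hp, hC⟩
      · exact Or.inl h
      · exact Or.inr ⟨hp, by omega⟩
    · -- food 1 survives: index 0 is in surv, i.e. s[0] = 0 means 0 ∈ surv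
      obtain ⟨a, t, hcons⟩ : ∃ a t, surv xs p' = a :: t := by
        cases hsv : surv xs p' with
        | nil => rw [hsv] at hsurvlen; simp at hsurvlen; omega
        | cons a b => exact ⟨a, b, rfl⟩
      rw [hcons, PySem.List.pyGetD_zero] at hs0
      simp at hs0
      have h0mem : (0 : Int) ∈ surv xs p' := by rw [hcons, hs0]; simp
      have := (surv_mem xs p' 0).mp h0mem
      obtain ⟨b, l, hbl⟩ : ∃ b l, xs = b :: l := by
        cases xs with
        | nil => simp at this
        | cons b l => exact ⟨b, l, rfl⟩
      rw [hbl]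
      simp only [List.headD_cons]
      have := this.2.2
      rw [hbl, PySem.List.pyGetD_zero] at this
      simpa using this
    · rw [cntC xs p' hp'0]
      omega
    · rw [cntC xs p' hp'0, ← hsurvlen, ← hk'C]
      exact Int.dvd_of_emod_eq_zero hm0
    · rw [cntC xs p' hp'0, ← hsurvlen, ← hk'C]
      omega

theorem solution_changed : Claim_changed_solution := by
  unfold Claim_changed_solution
  decide

theorem solution_tight : Claim_exact_solution := by
  intro xs k _ hpre hD
  obtain ⟨hk, hksum, p, hpmem, hpchar, hpall, hhead, hcnt2, hdvd, hne⟩ := hD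
  have hsum : ¬ xs.sum ≤ k := by omega
  obtain ⟨p', k', hp'eq, hk'eq, hk'0, hk'C, hchar, hall, hp'0, hcpos, hA, hB⟩ :=
    main_shape xs k hk hsum
  -- the characterized threshold is unique, so p = p'
  have hpchar' : p = 0 ∨ (p ∈ xs ∧ 0 < p ∧ Cspent xs p < k) := by
    rcases hpchar with h0 | ⟨hp, hC⟩
    · exact Or.inl h0
    · rcases List.mem_cons.mp hpmem with h | h
      · omega
      · exact Or.inr ⟨h, hp, by omega⟩
  have hp0 : 0 ≤ p := by
    rcases hpchar' with h | ⟨_, h, _⟩ <;> omega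
  have hpp' : p = p' := char_unique xs k p p' hpchar' hpall hchar hall
  subst hpp'
  set s := surv xs p with hsdef
  have hsurvlen : ((s.length : Int)) = (xs.countP (fun x => decide (p < x)) : Int) := by
    rw [hsdef]; exact surv_length xs p
  have hL2 : 2 ≤ (s.length : Int) := by
    rw [cntC xs p hp0] at hcnt2
    omega
  have hk'v : k' = k - Cspent xs p := hk'C
  have hm0 : k' % ((s.length : Int)) = 0 := by
    rw [cntC xs p hp0] at hdvd
    rw [hsurvlen, hk'v]
    exact Int.emod_eq_zero_of_dvd hdvd
  have hkl : k' ≠ ((s.length : Int)) := by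
    rw [cntC xs p hp0] at hne
    rw [hsurvlen, hk'v]
    exact hne
  -- index 0 survives, so s = 0 :: b :: …
  have h0mem : (0 : Int) ∈ s := by
    rw [hsdef, surv_mem]
    obtain ⟨b, l, hbl⟩ : ∃ b l, xs = b :: l := by
      cases xs with
      | nil => simp at hksum; omega
      | cons b l => exact ⟨b, l, rfl⟩
    refine ⟨le_rfl, by rw [hbl]; simp, ?_⟩
    rw [hbl, PySem.List.pyGetD_zero]
    rw [hbl] at hhead
    simpa using hhead
  obtain ⟨a, t, hcons⟩ : ∃ a t, s = a :: t := by
    cases hsv : s with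
    | nil => rw [hsv] at h0mem; simp at h0mem
    | cons a b => exact ⟨a, b, rfl⟩
  have ha0 : a = 0 := sorted_head_zero s (by rw [hsdef]; exact surv_sorted xs p)
    (fun i hi => ((surv_mem xs p i).mp (by rw [hsdef] at hi; exact hi)).1) a t hcons h0mem
  obtain ⟨b, t', hbt⟩ : ∃ b t', t = b :: t' := by
    cases ht : t with
    | nil => rw [hcons, ht] at hL2; simp at hL2
    | cons b t' => exact ⟨b, t', rfl⟩
  have hb0 : 0 < b := by
    have := surv_sorted xs p
    rw [← hsdef, hcons, hbt] at this
    have := List.rel_of_pairwise_cons this (List.mem_cons_self)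
    omega
  -- rA = 0 in A's tail, so eat = 0 and A picks the SECOND survivor b
  have hrA0 : (if k' > (xs.countP (fun x => decide (p < x)) : Int)
      then PySem.Int.mod k' (xs.countP (fun x => decide (p < x)) : Int) else k') = 0 := by
    by_cases hgt : k' > (xs.countP (fun x => decide (p < x)) : Int)
    · rw [if_pos hgt, PySem.Int.mod_eq_emod_of_pos (by omega)]
      rw [← hsurvlen]
      exact hm0
    · rw [if_neg hgt]
      have : k' % (xs.countP (fun x => decide (p < x)) : Int) = 0 := by
        rw [← hsurvlen]
        exact hm0
      have hklt : k' < (xs.countP (fun x => decide (p < x)) : Int) := by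
        rcases lt_or_eq_of_le (not_lt.mp hgt) with h | h
        · exact h
        · exfalso
          apply hkl
          rw [hsurvlen]
          exact h
      have := Int.emod_eq_of_lt hk'0 (by omega)
      omega
  have heat : eatOf xs p k' 0 = 0 := by
    simp only [eatOf]
    rw [hrA0]
    simp
  have hAval : solution xs k = b + 1 := by
    rw [hA, heat, hcons, hbt, ha0]
    rw [List.find?_cons_of_neg (by simp)]
    rw [List.find?_cons_of_pos (by simp [hb0])]
    simp
  have hBval : solution_alt xs k = 1 := by
    rw [hB, PySem.Int.mod_eq_emod_of_pos (by omega), hm0, hcons, ha0,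
      PySem.List.pyGetD_zero]
    simp
  rw [hAval, hBval]
  omega
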